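-- pv_equiv track=rewrite | github.com/FalkorDB/docs | check_h1_headings.py | has_h1_heading
-- ===== SOURCE A (Python) =====
-- def has_h1_heading(lines):
--     """Check if content has an H1 heading after frontmatter."""
--     in_frontmatter = False
--     frontmatter_ended = False
--
--     for i, line in enumerate(lines):
--         if i == 0 and line.strip().startswith('---'):
--             in_frontmatter = True
--             continue
--
--         if in_frontmatter and line.strip() == '---':
--             in_frontmatter = False
--             frontmatter_ended = True
--             continue
--
--         if frontmatter_ended or not in_frontmatter:
--             # Check for H1 heading (line starting with "# ")
--             if line.strip().startswith('# ') and len(line.strip()) > 2: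
--                 return True
--
--     return False
-- ===== SOURCE B (Python) =====
-- def has_h1_heading(lines):
--     """Check if content has an H1 heading after frontmatter."""
--     if lines and lines[0].strip().startswith('---'):
--         # find the closing '---' fence; unclosed frontmatter swallows everything
--         content = []
--         for j in range(1, len(lines)):
--             if lines[j].strip() == '---':
--                 content = lines[j + 1:]
--                 break
--     else:
--         content = lines
--     return any(s.startswith('# ') and len(s) > 2
--                for s in (l.strip() for l in content))
-- ===== Notes on version B (the rewrite author's own statement) =====
-- stated objective: simpler
-- what changed: Replaces A's single loop carrying in_frontmatter/frontmatter_ended flags with two separate phases: first locate the closing frontmatter fence to pick out the content lines, then one plain any() scan of those lines for an H1.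
import Mathlib
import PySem

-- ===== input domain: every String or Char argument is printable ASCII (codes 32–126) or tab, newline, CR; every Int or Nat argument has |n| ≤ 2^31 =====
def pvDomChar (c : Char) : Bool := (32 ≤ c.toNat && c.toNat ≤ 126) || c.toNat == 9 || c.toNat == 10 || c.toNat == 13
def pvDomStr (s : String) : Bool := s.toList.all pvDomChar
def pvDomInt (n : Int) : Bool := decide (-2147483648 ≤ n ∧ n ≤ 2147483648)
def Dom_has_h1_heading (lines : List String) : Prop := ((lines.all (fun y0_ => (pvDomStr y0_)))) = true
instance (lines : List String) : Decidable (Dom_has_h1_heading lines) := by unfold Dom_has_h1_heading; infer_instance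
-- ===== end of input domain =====

-- B separates boundary-finding (locate the closing frontmatter fence) from a single
-- H1 scan of the remaining lines, instead of A's one loop with two state flags: simpler.

-- ===== PORT A =====
-- the H1 test A applies to a non-skipped line
def pvIsH1 (line : String) : Bool :=
  PySem.Str.startswith (PySem.Str.strip line) "# " && PySem.Str.len (PySem.Str.strip line) > 2

-- A's loop: state (i, in_frontmatter, frontmatter_ended), early return True on an H1
def pvGoA : List String → Nat → Bool → Bool → Bool
  | [], _, _, _ => false
  | line :: rest, i, inFm, fmEnded =>
    if i = 0 ∧ PySem.Str.startswith (PySem.Str.strip line) "---" then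
      pvGoA rest (i + 1) true fmEnded
    else if inFm ∧ PySem.Str.strip line = "---" then
      pvGoA rest (i + 1) false true
    else if fmEnded || !inFm then
      if pvIsH1 line then true else pvGoA rest (i + 1) inFm fmEnded
    else
      pvGoA rest (i + 1) inFm fmEnded

def has_h1_heading (lines : List String) : Bool := pvGoA lines 0 false false

-- ===== PORT B =====
-- Source B's scan loop from index 1: the lines after the first '---' fence, none if unclosed
def pvAfterFence : List String → Option (List String)
  | [] => none
  | line :: rest => if PySem.Str.strip line = "---" then some rest else pvAfterFence rest

def has_h1_heading_alt (lines : List String) : Bool :=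
  let content :=
    match lines with
    | [] => []
    | line0 :: rest =>
      if PySem.Str.startswith (PySem.Str.strip line0) "---" then
        (pvAfterFence rest).getD []
      else lines
  content.any pvIsH1

-- ===== PRECONDITION & SPEC =====
def Spec_has_h1_heading (lines : List String) (out : Bool) : Prop := out = has_h1_heading_alt lines
instance (lines : List String) (out : Bool) : Decidable (Spec_has_h1_heading lines out) := by unfold Spec_has_h1_heading; infer_instance

-- ===== CLAIM (what is proved, stated in full; the proofs are below) =====
def Claim_equal_has_h1_heading : Prop := ∀ (lines : List String), Dom_has_h1_heading lines → Spec_has_h1_heading lines (has_h1_heading lines)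

-- ===== LEMMAS AND PROOFS =====

-- once past index 0 with in_frontmatter = False, A's loop is a plain H1 scan
theorem pvGoA_scan (ls : List String) (i : Nat) (fe : Bool) :
    pvGoA ls (i + 1) false fe = ls.any pvIsH1 := by
  induction ls generalizing i fe with
  | nil => simp [pvGoA]
  | cons l rest ih =>
    simp only [pvGoA, List.any_cons]
    rw [if_neg (by simp), if_neg (by simp)]
    simp only [Bool.not_false, Bool.or_true, if_true]
    by_cases h : pvIsH1 l = true
    · simp [h]
    · simp [h, ih]

-- inside unclosed-or-open frontmatter, A skips until the closing fence, then scans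
theorem pvGoA_fm (ls : List String) (i : Nat) :
    pvGoA ls (i + 1) true false = ((pvAfterFence ls).getD []).any pvIsH1 := by
  induction ls generalizing i with
  | nil => simp [pvGoA, pvAfterFence]
  | cons l rest ih =>
    simp only [pvGoA, pvAfterFence]
    rw [if_neg (by simp)]
    by_cases h : PySem.Str.strip l = "---"
    · rw [if_pos (by simp [h])]
      simp [h, pvGoA_scan]
    · rw [if_neg (by simp [h]), if_neg (by simp)]
      simpa [h] using ih (i + 1)

-- ===== VERDICT (by name: the statement is the Claim_ definition above) =====
theorem has_h1_heading_spec : Claim_equal_has_h1_heading := by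
  intro lines _
  unfold Spec_has_h1_heading has_h1_heading has_h1_heading_alt
  cases lines with
  | nil => simp [pvGoA]
  | cons l0 rest =>
    by_cases h0 : PySem.Str.startswith (PySem.Str.strip l0) "---" = true
    · simp only [pvGoA, h0]
      rw [if_pos (by simp [h0])]
      simpa using pvGoA_fm rest 0
    · simp only [pvGoA]
      simp only [Bool.not_eq_true] at h0
      simp at h0
      rw [if_neg (by simp [h0]), if_neg (by simp)]
      simp only [Bool.not_false, Bool.or_true, if_true]
      by_cases h : pvIsH1 l0 = true
      · simp [h, h0]
      · simp [h, h0, pvGoA_scan rest 0]
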